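-- pv_equiv track=rewrite | github.com/mattiabachini/code-satp | models/location-models/utils/span_ner_utils.py | bio_tags_to_label_ids
-- ===== SOURCE A (Python) =====
-- from typing import List, Dict, Tuple, Optional
--
-- def bio_tags_to_label_ids(tags: List[str], label_list: List[str]) -> List[int]:
--     """
--     Convert BIO tags to label IDs for model training.
--
--     Args:
--         tags: List of BIO tags (e.g., ['O', 'B-STATE', 'I-STATE', ...])
--         label_list: List of entity labels
--
--     Returns:
--         List of label IDs
--     """
--     # Create comprehensive tag vocabulary
--     tag_to_id = {'O': 0}
--     current_id = 1
--
--     for label in label_list: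
--         tag_to_id[f'B-{label}'] = current_id
--         current_id += 1
--         tag_to_id[f'I-{label}'] = current_id
--         current_id += 1
--
--     # Convert tags to IDs
--     label_ids = []
--     for tag in tags:
--         if tag in tag_to_id:
--             label_ids.append(tag_to_id[tag])
--         else:
--             # Unknown tag, treat as 'O'
--             label_ids.append(0)
--
--     return label_ids
-- ===== SOURCE B (Python) =====
-- def bio_tags_to_label_ids(tags, label_list):
--     """Half-size label index + prefix parsing instead of materialising every B-/I- key."""
--     label_to_idx = {label: i for i, label in enumerate(label_list)}
--     ids = []
--     for tag in tags:
--         if tag == 'O':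
--             ids.append(0)
--         elif tag.startswith('B-') and tag[2:] in label_to_idx:
--             ids.append(2 * label_to_idx[tag[2:]] + 1)
--         elif tag.startswith('I-') and tag[2:] in label_to_idx:
--             ids.append(2 * label_to_idx[tag[2:]] + 2)
--         else:
--             ids.append(0)
--     return ids
-- ===== Notes on version B (the rewrite author's own statement) =====
-- stated objective: simpler
-- what changed: B keeps a half-size dict mapping each label to its enumerate index (last occurrence wins, like A's overwrite) and computes each id by parsing the B-/I- prefix and the formula 2*i+1 / 2*i+2, instead of materialising a dict with two synthesized keys per label.
import Mathlib
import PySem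

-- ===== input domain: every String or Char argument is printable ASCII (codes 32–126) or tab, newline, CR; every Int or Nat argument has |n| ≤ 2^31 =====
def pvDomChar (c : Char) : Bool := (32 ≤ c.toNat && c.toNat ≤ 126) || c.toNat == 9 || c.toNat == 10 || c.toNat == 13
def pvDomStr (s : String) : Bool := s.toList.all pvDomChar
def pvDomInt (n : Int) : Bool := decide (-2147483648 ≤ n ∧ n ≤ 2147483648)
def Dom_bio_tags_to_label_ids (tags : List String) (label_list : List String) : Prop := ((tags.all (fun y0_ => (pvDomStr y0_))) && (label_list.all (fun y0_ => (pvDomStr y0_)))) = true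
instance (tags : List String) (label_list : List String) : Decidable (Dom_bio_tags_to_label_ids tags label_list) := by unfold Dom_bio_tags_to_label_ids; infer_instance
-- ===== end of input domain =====

-- B replaces A's dict of two synthesized B-/I- keys per label by a half-size label→index dict
-- plus prefix parsing with the 2*i+1 / 2*i+2 formula (objective: simpler).


-- ===== PORT A =====
-- tag_to_id = {'O': 0}; current_id = 1; for label in label_list: add 'B-'+label, 'I-'+label
def pvTagDictA (label_list : List String) : PySem.Dict String Int × Int :=
  label_list.foldl
    (fun s l => ((s.1.insert ("B-" ++ l) s.2).insert ("I-" ++ l) (s.2 + 1), s.2 + 2))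
    (PySem.Dict.empty.insert "O" 0, 1)

def bio_tags_to_label_ids (tags : List String) (label_list : List String) : List Int :=
  let tag_to_id := (pvTagDictA label_list).1
  tags.foldl
    (fun acc tag =>
      if tag_to_id.contains tag then acc ++ [(tag_to_id.get? tag).getD 0]
      else acc ++ [0])
    []

-- ===== PORT B =====
-- label_to_idx = {label: i for i, label in enumerate(label_list)}
def pvLabelDictB (label_list : List String) : PySem.Dict String Int :=
  (PySem.List.enumerate label_list 0).foldl (fun d p => d.insert p.2 p.1) PySem.Dict.empty

def bio_tags_to_label_ids_alt (tags : List String) (label_list : List String) : List Int :=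
  let label_to_idx := pvLabelDictB label_list
  tags.foldl
    (fun acc tag =>
      let suf := PySem.Str.slice tag (some 2) none
      if tag == "O" then acc ++ [0]
      else if PySem.Str.startswith tag "B-" && (label_to_idx.get? suf).isSome then
        acc ++ [2 * (label_to_idx.get? suf).getD 0 + 1]
      else if PySem.Str.startswith tag "I-" && (label_to_idx.get? suf).isSome then
        acc ++ [2 * (label_to_idx.get? suf).getD 0 + 2]
      else acc ++ [0])
    []

-- ===== PRECONDITION & SPEC =====
def Spec_bio_tags_to_label_ids (tags : List String) (label_list : List String) (out : List Int) : Prop := out = bio_tags_to_label_ids_alt tags label_list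
instance (tags : List String) (label_list : List String) (out : List Int) : Decidable (Spec_bio_tags_to_label_ids tags label_list out) := by unfold Spec_bio_tags_to_label_ids; infer_instance

-- ===== CLAIM (what is proved, stated in full; the proofs are below) =====
def Claim_equal_bio_tags_to_label_ids : Prop := ∀ (tags : List String) (label_list : List String), Dom_bio_tags_to_label_ids tags label_list → Spec_bio_tags_to_label_ids tags label_list (bio_tags_to_label_ids tags label_list)

-- ===== LEMMAS AND PROOFS =====

-- the running counter of A's vocabulary loop, from any start state
lemma pv_snd_general (ls : List String) (s : PySem.Dict String Int × Int) :
    (ls.foldl (fun s l => ((s.1.insert ("B-" ++ l) s.2).insert ("I-" ++ l) (s.2 + 1), s.2 + 2)) s).2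
      = s.2 + 2 * ls.length := by
  induction ls generalizing s with
  | nil => simp
  | cons h t ih => simp [List.foldl_cons, ih]; ring

lemma pvTagDictA_snd (ls : List String) : (pvTagDictA ls).2 = 1 + 2 * ls.length := by
  unfold pvTagDictA; rw [pv_snd_general]

lemma pvTagDictA_append (ls : List String) (l : String) :
    pvTagDictA (ls ++ [l]) =
      (((pvTagDictA ls).1.insert ("B-" ++ l) (pvTagDictA ls).2).insert ("I-" ++ l)
        ((pvTagDictA ls).2 + 1), (pvTagDictA ls).2 + 2) := by
  simp [pvTagDictA, List.foldl_append]

lemma pvLabelDictB_append (ls : List String) (l : String) :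
    pvLabelDictB (ls ++ [l]) = (pvLabelDictB ls).insert l (ls.length : Int) := by
  simp [pvLabelDictB, PySem.List.enumerate_append, List.foldl_append,
        PySem.List.enumerate_cons, PySem.List.enumerate_nil]

-- tag[2:] on the character level
lemma pv_slice2_toList (s : String) :
    (PySem.Str.slice s (some 2) none).toList = s.toList.drop 2 := by
  simp only [PySem.Str.toList_slice, PySem.Chars.slice_eq_listSlice]
  rw [show ((2:Int)) = ((2:Nat):Int) by norm_num, PySem.List.slice_from_natCast]

lemma pv_slice2_append (p : String) (l : String) (hp : p.toList.length = 2) :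
    PySem.Str.slice (p ++ l) (some 2) none = l := by
  apply String.toList_injective
  rw [pv_slice2_toList]
  simp [hp]

-- A's lookup, characterised through B's half-size dict
lemma pv_lookup (ls : List String) (tag : String) :
    (pvTagDictA ls).1.get? tag =
      if tag = "O" then some 0
      else if PySem.Str.startswith tag "B-" then
        ((pvLabelDictB ls).get? (PySem.Str.slice tag (some 2) none)).map (fun i => 2 * i + 1)
      else if PySem.Str.startswith tag "I-" then
        ((pvLabelDictB ls).get? (PySem.Str.slice tag (some 2) none)).map (fun i => 2 * i + 2)
      else none := by
  induction ls using List.reverseRecOn with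
  | nil =>
    by_cases hO : tag = "O"
    · simp [pvTagDictA, hO]
    · simp only [pvTagDictA, List.foldl_nil, pvLabelDictB, PySem.List.enumerate_nil,
        PySem.Dict.get?_insert, hO, if_false, PySem.Dict.get?_empty, Option.map_none]
      split_ifs <;> simp [PySem.Dict.get?_empty]
  | append_singleton ls l ih =>
    rw [pvTagDictA_append, pvLabelDictB_append]
    dsimp only
    have hBO : ("B-" ++ l : String) ≠ "O" := by simp [String.ext_iff]
    have hIO : ("I-" ++ l : String) ≠ "O" := by simp [String.ext_iff]
    have hBI : ("B-" ++ l : String) ≠ "I-" ++ l := by simp [String.ext_iff]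
    by_cases hI : tag = "I-" ++ l
    · subst hI
      rw [PySem.Dict.get?_insert_self]
      have hsw1 : PySem.Str.startswith ("I-" ++ l) "B-" = false := by
        rw [Bool.eq_false_iff]; simp [PySem.Chars.startswith_iff]
      have hsw2 : PySem.Str.startswith ("I-" ++ l) "I-" = true := by
        simp [PySem.Chars.startswith_iff]
      rw [if_neg hIO, hsw1, if_neg (by simp), hsw2, if_pos rfl,
          pv_slice2_append "I-" l (by decide), PySem.Dict.get?_insert_self,
          pvTagDictA_snd]
      simp; ring
    · rw [PySem.Dict.get?_insert_of_ne _ _ hI]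
      by_cases hB : tag = "B-" ++ l
      · subst hB
        rw [PySem.Dict.get?_insert_self]
        have hsw1 : PySem.Str.startswith ("B-" ++ l) "B-" = true := by
          simp [PySem.Chars.startswith_iff]
        rw [if_neg hBO, hsw1, if_pos rfl, pv_slice2_append "B-" l (by decide),
            PySem.Dict.get?_insert_self, pvTagDictA_snd]
        simp; ring
      · rw [PySem.Dict.get?_insert_of_ne _ _ hB, ih]
        by_cases hO : tag = "O"
        · simp [hO]
        rw [if_neg hO, if_neg hO]
        have hsuf : ∀ (p : String), p.toList.length = 2 →
            PySem.Str.startswith tag p = true → tag ≠ p ++ l →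
            PySem.Str.slice tag (some 2) none ≠ l := by
          intro p hp hsw hne
          have h1 : p.toList <+: tag.toList := by
            have := (PySem.Chars.startswith_iff tag.toList p.toList).mp (by simpa using hsw)
            exact this
          obtain ⟨rest, hrest⟩ := h1
          intro hcon
          apply hne
          apply String.toList_injective
          have h2 : (PySem.Str.slice tag (some 2) none).toList = rest := by
            rw [pv_slice2_toList, ← hrest]
            simp [hp]
          rw [← hrest]
          simp [← h2, hcon]
        by_cases hsw1 : PySem.Str.startswith tag "B-" = true
        · rw [PySem.Dict.get?_insert_of_ne _ _ (hsuf "B-" (by decide) hsw1 hB)]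
        · by_cases hsw2 : PySem.Str.startswith tag "I-" = true
          · rw [PySem.Dict.get?_insert_of_ne _ _ (hsuf "I-" (by decide) hsw2 hI)]
          · rw [if_neg hsw1, if_neg hsw2, if_neg hsw1, if_neg hsw2]

-- the two loop bodies produce the same element for every tag
lemma pv_elem (ls : List String) (tag : String) :
    (if (pvTagDictA ls).1.contains tag then ((pvTagDictA ls).1.get? tag).getD 0 else 0)
      = (let d := pvLabelDictB ls
         let suf := PySem.Str.slice tag (some 2) none
         if tag == "O" then 0
         else if PySem.Str.startswith tag "B-" && (d.get? suf).isSome then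
           2 * (d.get? suf).getD 0 + 1
         else if PySem.Str.startswith tag "I-" && (d.get? suf).isSome then
           2 * (d.get? suf).getD 0 + 2
         else 0) := by
  have hc : (pvTagDictA ls).1.contains tag = ((pvTagDictA ls).1.get? tag).isSome := by
    rcases h : (pvTagDictA ls).1.get? tag with _ | v
    · simpa using (PySem.Dict.get?_eq_none_iff_contains _ _).mp h
    · simp only [Option.isSome_some]
      by_contra hcon
      rw [Bool.not_eq_true] at hcon
      rw [(PySem.Dict.get?_eq_none_iff_contains _ _).mpr hcon] at h
      simp at h
  rw [hc, pv_lookup]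
  dsimp only
  by_cases hO : tag = "O"
  · simp [hO]
  · rw [if_neg hO, show (tag == "O") = false by simp [hO]]
    simp only [Bool.false_eq_true, if_false]
    rcases hget : (pvLabelDictB ls).get? (PySem.Str.slice tag (some 2) none) with _ | v <;>
      rcases hsw1 : PySem.Str.startswith tag "B-" with _ | _ <;>
        rcases hsw2 : PySem.Str.startswith tag "I-" with _ | _ <;>
          simp only [hsw1, hsw2, hget, Bool.false_and, Bool.true_and, Bool.false_eq_true,
            if_false, if_true, Option.isSome_none, Option.isSome_some, Option.map_none,
            Option.map_some, Option.getD_none, Option.getD_some, ite_self] <;>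
          first | rfl | ring | simp

lemma pv_fold_eq (ls : List String) (tags : List String) (acc : List Int) :
    tags.foldl
      (fun acc tag =>
        if (pvTagDictA ls).1.contains tag then acc ++ [((pvTagDictA ls).1.get? tag).getD 0]
        else acc ++ [0]) acc
    = tags.foldl
      (fun acc tag =>
        let suf := PySem.Str.slice tag (some 2) none
        if tag == "O" then acc ++ [0]
        else if PySem.Str.startswith tag "B-" && ((pvLabelDictB ls).get? suf).isSome then
          acc ++ [2 * ((pvLabelDictB ls).get? suf).getD 0 + 1]
        else if PySem.Str.startswith tag "I-" && ((pvLabelDictB ls).get? suf).isSome then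
          acc ++ [2 * ((pvLabelDictB ls).get? suf).getD 0 + 2]
        else acc ++ [0]) acc := by
  induction tags generalizing acc with
  | nil => rfl
  | cons t ts ih =>
    simp only [List.foldl_cons]
    rw [ih]
    congr 1
    have ha : (if (pvTagDictA ls).1.contains t = true
          then acc ++ [((pvTagDictA ls).1.get? t).getD 0] else acc ++ [0])
        = acc ++ [if (pvTagDictA ls).1.contains t = true
          then ((pvTagDictA ls).1.get? t).getD 0 else 0] := by
      split_ifs <;> rfl
    have hb : ∀ (c1 c2 c3 : Bool) (x y : Int),
        (if c1 = true then acc ++ [0] else if c2 = true then acc ++ [x]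
          else if c3 = true then acc ++ [y] else acc ++ [0])
        = acc ++ [if c1 = true then 0 else if c2 = true then x
          else if c3 = true then y else 0] := by
      intro c1 c2 c3 x y; split_ifs <;> rfl
    rw [ha, hb]
    have he := pv_elem ls t
    dsimp only at he
    rw [he]

-- ===== VERDICT (by name: the statement is the Claim_ definition above) =====
theorem bio_tags_to_label_ids_spec : Claim_equal_bio_tags_to_label_ids := by
  intro tags label_list _
  unfold Spec_bio_tags_to_label_ids bio_tags_to_label_ids bio_tags_to_label_ids_alt
  exact pv_fold_eq label_list tags []
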